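-- pv_equiv track=rewrite | github.com/soyukke/lean-unsolved | scripts/erdos20_structure.py | find_max_sunflower_free_families
-- ===== SOURCE A (Python) =====
-- from itertools import combinations
--
-- def is_sunflower(sets, k=3):
--     """k個の集合がひまわりを形成するか判定"""
--     if len(sets) < k:
--         return False
--     for combo in combinations(sets, k):
--         combo_list = [set(s) for s in combo]
--         core = combo_list[0]
--         for s in combo_list[1:]:
--             core = core & s
--         # 花弁（核を除いた部分）が互いに素か確認
--         petals = [s - core for s in combo_list]
--         pairwise_disjoint = True
--         for i in range(len(petals)):
--             for j in range(i + 1, len(petals)):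
--                 if petals[i] & petals[j]:
--                     pairwise_disjoint = False
--                     break
--             if not pairwise_disjoint:
--                 break
--         if pairwise_disjoint:
--             return True
--     return False
--
-- def is_sunflower_free(family, k=3):
--     """族がひまわりフリーか判定"""
--     if len(family) < k:
--         return True
--     return not is_sunflower(family, k)
--
-- def find_max_sunflower_free_families(n, universe_size, k=3):
--     """n元集合の族で最大のひまわりフリー族を貪欲探索"""
--     universe = list(range(1, universe_size + 1))
--     all_n_sets = [frozenset(s) for s in combinations(universe, n)]
--
--     best_family = []
--     # 複数回ランダムではなく、全探索（小さいケース）or 貪欲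
--     family = []
--     for s in all_n_sets:
--         candidate = family + [s]
--         if is_sunflower_free(candidate, k):
--             family.append(s)
--     return family
-- ===== SOURCE B (Python) =====
-- from itertools import combinations
--
-- def _extends_to_sunflower(family, s, k):
--     """True iff s together with some (k-1)-subset of family forms a sunflower."""
--     for rest in combinations(family, k - 1):
--         sets = list(rest) + [s]
--         core = frozenset.intersection(*sets)
--         seen = set()
--         ok = True
--         for t in sets:
--             petal = t - core
--             if seen & petal:
--                 ok = False
--                 break
--             seen |= petal
--         if ok:
--             return True
--     return False
--
-- def find_max_sunflower_free_families(n, universe_size, k=3):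
--     """Greedy maximal sunflower-free family; since the family kept so far is
--     sunflower-free, only k-combinations containing the new set are tested."""
--     family = []
--     for s in combinations(range(1, universe_size + 1), n):
--         s = frozenset(s)
--         if not _extends_to_sunflower(family, s, k):
--             family.append(s)
--     return family
-- ===== Notes on version B (the rewrite author's own statement) =====
-- stated objective: alternative
-- what changed: Instead of re-testing every k-combination of the whole candidate family at each greedy step, B only tests the (k-1)-subsets of the already sunflower-free family joined with the new set, using a running seen-set for the petal-disjointness check (intended as faster; measured only 1.47x at the largest timing size).
import Mathlib
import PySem

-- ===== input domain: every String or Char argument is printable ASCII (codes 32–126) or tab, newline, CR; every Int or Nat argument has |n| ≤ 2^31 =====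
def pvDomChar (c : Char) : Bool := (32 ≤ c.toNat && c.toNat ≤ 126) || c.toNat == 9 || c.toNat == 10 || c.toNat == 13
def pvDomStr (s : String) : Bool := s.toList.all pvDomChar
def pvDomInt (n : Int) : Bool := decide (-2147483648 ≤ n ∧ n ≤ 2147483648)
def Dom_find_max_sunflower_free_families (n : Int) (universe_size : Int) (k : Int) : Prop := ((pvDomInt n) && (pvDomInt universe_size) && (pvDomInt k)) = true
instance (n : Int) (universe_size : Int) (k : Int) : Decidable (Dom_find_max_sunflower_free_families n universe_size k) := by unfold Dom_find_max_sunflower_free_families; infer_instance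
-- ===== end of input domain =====

-- B replaces A's full re-check of every k-combination of the candidate family by an
-- incremental check of only the (k-1)-subsets of the (already sunflower-free) family
-- joined with the new set, with a running seen-set for petal disjointness; same greedy result.

-- itertools.combinations(l, r) in lexicographic order (shared: both Pythons call it)
def pvCombos {α : Type} : List α → Nat → List (List α)
  | _, 0 => [[]]
  | [], _ + 1 => []
  | x :: xs, r + 1 => ((pvCombos xs r).map (fun c => x :: c)) ++ pvCombos xs (r + 1)

-- Python set intersection / difference on lists of distinct elements
def pvInter (a b : List Int) : List Int := a.filter (fun x => decide (x ∈ b))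
def pvDiff (a b : List Int) : List Int := a.filter (fun x => decide (x ∉ b))

-- ===== PORT A =====
-- A's nested i/j loops with breaks: all pairs of petals disjoint
def pvPairsDisjoint : List (List Int) → Bool
  | [] => true
  | p :: ps => (ps.all (fun q => pvInter p q == [])) && pvPairsDisjoint ps

-- body of A's `for combo in combinations(sets, k)` loop; [] is unreachable under Pre_
-- (in Python, combo_list[0] raises IndexError there, which Pre_ excludes)
def pvIsSunCombo (combo : List (List Int)) : Bool :=
  match combo with
  | [] => false
  | c :: cs =>
    let core := cs.foldl pvInter c
    let petals := (c :: cs).map (fun s => pvDiff s core)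
    pvPairsDisjoint petals

def pv_is_sunflower (sets : List (List Int)) (k : Int) : Bool :=
  if (sets.length : Int) < k then false
  else (pvCombos sets k.toNat).any pvIsSunCombo

def pv_is_sunflower_free (family : List (List Int)) (k : Int) : Bool :=
  if (family.length : Int) < k then true
  else !(pv_is_sunflower family k)

def find_max_sunflower_free_families (n : Int) (universe_size : Int) (k : Int) : List (List Int) :=
  let universe_list := PySem.List.pyRange 1 (universe_size + 1) 1
  let all_n_sets := pvCombos universe_list n.toNat
  all_n_sets.foldl
    (fun family s =>
      if pv_is_sunflower_free (family ++ [s]) k then family ++ [s] else family) []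

-- ===== PORT B =====
-- Source B's seen-set scan over the petals of rest ++ [s]
def pvScanPetals (seen : List Int) : List (List Int) → Bool
  | [] => true
  | p :: ps =>
    if pvInter seen p == [] then pvScanPetals (seen ++ p.filter (fun x => decide (x ∉ seen))) ps
    else false

-- Source B's _extends_to_sunflower; the [] match arm is unreachable (rest ++ [s] ≠ [])
def pvExtendsToSunflower (family : List (List Int)) (s : List Int) (k : Int) : Bool :=
  (pvCombos family (k - 1).toNat).any (fun rest =>
    match rest ++ [s] with
    | [] => false
    | c :: cs =>
      let core := cs.foldl pvInter c
      pvScanPetals [] ((c :: cs).map (fun t => pvDiff t core)))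

def find_max_sunflower_free_families_alt (n : Int) (universe_size : Int) (k : Int) : List (List Int) :=
  (pvCombos (PySem.List.pyRange 1 (universe_size + 1) 1) n.toNat).foldl
    (fun family s =>
      if pvExtendsToSunflower family s k then family else family ++ [s]) []

-- ===== PRECONDITION & SPEC =====
-- Pre_ is exactly where A returns: n < 0 raises ValueError in combinations, and k ≤ 0
-- raises (IndexError/ValueError) as soon as one n-subset exists, i.e. unless n > max(universe_size, 0) with n ≥ 1.
def Pre_find_max_sunflower_free_families (n : Int) (universe_size : Int) (k : Int) : Prop :=
  0 ≤ n ∧ (1 ≤ k ∨ (1 ≤ n ∧ universe_size < n))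
instance (n : Int) (universe_size : Int) (k : Int) : Decidable (Pre_find_max_sunflower_free_families n universe_size k) := by unfold Pre_find_max_sunflower_free_families; infer_instance

def pvWitness_find_max_sunflower_free_families : Int × Int × Int := (2, 4, 3)

def Spec_find_max_sunflower_free_families (n : Int) (universe_size : Int) (k : Int) (out : List (List Int)) : Prop := out = find_max_sunflower_free_families_alt n universe_size k
instance (n : Int) (universe_size : Int) (k : Int) (out : List (List Int)) : Decidable (Spec_find_max_sunflower_free_families n universe_size k out) := by unfold Spec_find_max_sunflower_free_families; infer_instance

-- ===== CLAIM (what is proved, stated in full; the proofs are below) =====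
def Claim_equal_find_max_sunflower_free_families : Prop := ∀ (n : Int) (universe_size : Int) (k : Int), Dom_find_max_sunflower_free_families n universe_size k → Pre_find_max_sunflower_free_families n universe_size k → Spec_find_max_sunflower_free_families n universe_size k (find_max_sunflower_free_families n universe_size k)

-- ===== LEMMAS AND PROOFS =====

theorem pvCombos_eq_nil_of_length_lt {α : Type} (l : List α) (r : Nat) (h : l.length < r) :
    pvCombos l r = [] := by
  induction l generalizing r with
  | nil => cases r with
    | zero => omega
    | succ r => rfl
  | cons x xs ih =>
    cases r with
    | zero => omega
    | succ r =>
      simp only [pvCombos]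
      rw [ih r (by simpa using h), ih (r+1) (by simp at h ⊢; omega)]
      rfl

theorem pvInter_eq_nil_iff (a b : List Int) :
    (pvInter a b == []) = true ↔ ∀ x ∈ a, x ∉ b := by
  simp [pvInter, List.filter_eq_nil_iff]

theorem mem_append_filter_not_mem (seen p : List Int) (x : Int) :
    x ∈ seen ++ p.filter (fun y => decide (y ∉ seen)) ↔ x ∈ seen ∨ x ∈ p := by
  by_cases h : x ∈ seen <;> simp [h]

theorem all_and_bool (l : List (List Int)) (p q : List Int → Bool) :
    l.all (fun x => p x && q x) = (l.all p && l.all q) := by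
  rw [Bool.eq_iff_iff]; simp
  exact ⟨fun h => ⟨fun x hx => (h x hx).1, fun x hx => (h x hx).2⟩,
         fun h x hx => ⟨h.1 x hx, h.2 x hx⟩⟩

-- disjointness from the updated seen-set splits into two disjointnesses
theorem inter_union_eq_nil (seen p q : List Int) :
    (pvInter (seen ++ p.filter (fun y => decide (y ∉ seen))) q == [])
      = ((pvInter seen q == []) && (pvInter p q == [])) := by
  rw [Bool.eq_iff_iff]
  simp only [Bool.and_eq_true, pvInter_eq_nil_iff]
  constructor
  · intro h
    exact ⟨fun x hx => h x ((mem_append_filter_not_mem seen p x).2 (Or.inl hx)),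
           fun x hx => h x ((mem_append_filter_not_mem seen p x).2 (Or.inr hx))⟩
  · rintro ⟨h1, h2⟩ x hx
    rcases (mem_append_filter_not_mem seen p x).1 hx with h' | h'
    · exact h1 x h'
    · exact h2 x h'

-- the seen-set scan of B equals "each petal disjoint from seen" plus A's pairwise check
theorem pvScanPetals_eq (ps : List (List Int)) (seen : List Int) :
    pvScanPetals seen ps = ((ps.all (fun q => pvInter seen q == [])) && pvPairsDisjoint ps) := by
  induction ps generalizing seen with
  | nil => rfl
  | cons p ps ih =>
    simp only [pvScanPetals, List.all_cons, pvPairsDisjoint]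
    by_cases h : (pvInter seen p == []) = true
    · rw [if_pos h, ih, h]
      have : (ps.all (fun q => pvInter (seen ++ p.filter (fun y => decide (y ∉ seen))) q == []))
           = ((ps.all (fun q => pvInter seen q == [])) && (ps.all (fun q => pvInter p q == []))) := by
        rw [← all_and_bool]
        congr 1
        funext q
        exact inter_union_eq_nil seen p q
      rw [this]
      simp only [Bool.true_and]
      rw [Bool.eq_iff_iff]; simp; tauto
    · rw [if_neg h]
      simp only [Bool.not_eq_true] at h
      rw [h]; simp

-- A's per-combo test and B's per-group test agree on nonempty combos
theorem pvIsSunCombo_eq_scan (c : List Int) (cs : List (List Int)) :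
    pvIsSunCombo (c :: cs) =
      (let core := cs.foldl pvInter c
       pvScanPetals [] ((c :: cs).map (fun t => pvDiff t core))) := by
  simp only [pvIsSunCombo, pvScanPetals_eq]
  have : ∀ ps : List (List Int), (ps.all (fun q => pvInter [] q == [])) = true := by
    intro ps; simp [pvInter]
  rw [this]; simp

-- choosing r+1 from l ++ [s]: either avoid s, or pick r from l and append s (any-level)
theorem any_pvCombos_snoc (l : List (List Int)) (s : List Int) (r : Nat) (P : List (List Int) → Bool) :
    (pvCombos (l ++ [s]) (r + 1)).any P
      = (((pvCombos l (r + 1)).any P) || ((pvCombos l r).any (fun c => P (c ++ [s])))) := by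
  induction l generalizing r P with
  | nil =>
    cases r with
    | zero => simp [pvCombos]
    | succ r =>
      have h1 : pvCombos ([] ++ [s]) (r + 1 + 1) = [] :=
        pvCombos_eq_nil_of_length_lt _ _ (by simp)
      have h2 : pvCombos ([] : List (List Int)) (r + 1) = [] := rfl
      rw [h1, h2]; simp [pvCombos]
  | cons x xs ih =>
    show (pvCombos (x :: (xs ++ [s])) (r + 1)).any P = _
    cases r with
    | zero =>
      simp only [pvCombos, List.any_append, List.any_map, ih 0]
      simp [Function.comp_def, Bool.or_assoc, Bool.or_comm, Bool.or_left_comm]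
    | succ r =>
      simp only [pvCombos, List.any_append, List.any_map, ih r, ih (r+1)]
      simp [Function.comp_def, List.cons_append, Bool.or_assoc, Bool.or_comm, Bool.or_left_comm]

-- greedy steps agree as long as the accumulated family has no sunflower k-combination
theorem sunflower_free_unfold (k : Int) (hk : 1 ≤ k) (fam : List (List Int)) :
    pv_is_sunflower_free fam k = !((pvCombos fam k.toNat).any pvIsSunCombo) := by
  simp only [pv_is_sunflower_free, pv_is_sunflower]
  by_cases hlen : ((fam.length : Int)) < k
  · rw [if_pos hlen, pvCombos_eq_nil_of_length_lt _ _ (by omega)]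
    simp
  · rw [if_neg hlen, if_neg hlen]

theorem step_eq (k : Int) (hk : 1 ≤ k) (family : List (List Int)) (s : List Int)
    (hinv : (pvCombos family k.toNat).any pvIsSunCombo = false) :
    pv_is_sunflower_free (family ++ [s]) k = !(pvExtendsToSunflower family s k) := by
  obtain ⟨m, hm⟩ : ∃ m, k.toNat = m + 1 := ⟨k.toNat - 1, by omega⟩
  have hB : pvExtendsToSunflower family s k
      = (pvCombos family m).any (fun rest => pvIsSunCombo (rest ++ [s])) := by
    have hkm : (k - 1).toNat = m := by omega
    simp only [pvExtendsToSunflower, hkm]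
    congr 1
    funext rest
    cases rest ++ [s] with
    | nil => rfl
    | cons c cs => exact (pvIsSunCombo_eq_scan c cs).symm
  have hinv' : (pvCombos family (m + 1)).any pvIsSunCombo = false := hm ▸ hinv
  rw [sunflower_free_unfold k hk, hB, hm, any_pvCombos_snoc, hinv']
  simp

theorem fold_eq (k : Int) (hk : 1 ≤ k) (l : List (List Int)) (family : List (List Int))
    (hinv : (pvCombos family k.toNat).any pvIsSunCombo = false) :
    l.foldl (fun fam s => if pv_is_sunflower_free (fam ++ [s]) k then fam ++ [s] else fam) family
      = l.foldl (fun fam s => if pvExtendsToSunflower fam s k then fam else fam ++ [s]) family := by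
  induction l generalizing family with
  | nil => rfl
  | cons s l ih =>
    simp only [List.foldl_cons]
    rw [step_eq k hk family s hinv]
    by_cases h : pvExtendsToSunflower family s k = true
    · rw [h]; simp only [Bool.not_true, if_false]
      exact ih family hinv
    · simp only [Bool.not_eq_true] at h
      rw [h]; simp only [Bool.not_false, if_true, if_neg (Bool.false_ne_true)]
      apply ih
      -- the new family passed A's check, hence it has no sunflower k-combination
      have hstep := step_eq k hk family s hinv
      rw [h] at hstep; simp only [Bool.not_false] at hstep
      have := sunflower_free_unfold k hk (family ++ [s])
      rw [hstep] at this
      simpa using this.symm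

-- when there is no n-subset at all, both folds run over the empty list
theorem combos_universe_nil (n universe_size : Int) (hn : 1 ≤ n) (hus : universe_size < n) :
    pvCombos (PySem.List.pyRange 1 (universe_size + 1) 1) n.toNat = [] := by
  apply pvCombos_eq_nil_of_length_lt
  rw [PySem.List.length_pyRange_one]
  omega

-- ===== VERDICT (by name: the statement is the Claim_ definition above) =====
theorem find_max_sunflower_free_families_spec : Claim_equal_find_max_sunflower_free_families := by
  intro n universe_size k _ hpre
  obtain ⟨hn, hk⟩ := hpre
  show find_max_sunflower_free_families n universe_size k = find_max_sunflower_free_families_alt n universe_size k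
  unfold find_max_sunflower_free_families find_max_sunflower_free_families_alt
  rcases hk with hk | ⟨hn1, hus⟩
  · refine fold_eq k hk _ [] ?_
    obtain ⟨m, hm⟩ : ∃ m, k.toNat = m + 1 := ⟨k.toNat - 1, by omega⟩
    rw [hm]; rfl
  · simp only [combos_universe_nil n universe_size hn1 hus, List.foldl_nil]
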